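-- pv_equiv track=rewrite | github.com/PlaviAjvar/Boolean-Algebra | NANDminimize/NANDmini.py | parse_dnf
-- ===== SOURCE A (Python) =====
-- def parse_dnf(dnf_str):
--     # we first strip all whitespace
--     dnf_str = "".join(dnf_str)
--     conj_list = dnf_str.split('v')  # splits expression by disjunction
--     conj_num = len(conj_list)
--
--     dnf = [[] for i in range(conj_num)]
--     for conj_idx in range(conj_num):
--         conj_len = len(conj_list[conj_idx])
--         for i in range(conj_len):
--             if conj_list[conj_idx][i].isalnum():
--                 # pass the ascii value of the character into the dnf list
--                 # if the argument is negated, pass it's negative ascii value into the dnf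
--                 if i < conj_len-1 and conj_list[conj_idx][i+1] == "'":
--                     dnf[conj_idx].append(-ord(conj_list[conj_idx][i]))
--                 else:
--                     dnf[conj_idx].append(ord(conj_list[conj_idx][i]))
--
--     return dnf
-- ===== SOURCE B (Python) =====
-- def parse_dnf(dnf_str):
--     # single pass over the raw string: 'v' starts a new conjunction,
--     # an alphanumeric char contributes +/- its code depending on a "'" lookahead
--     res = [[]]
--     n = len(dnf_str)
--     for i, c in enumerate(dnf_str):
--         if c == 'v':
--             res.append([])
--         elif c.isalnum():
--             lit = ord(c)
--             if i + 1 < n and dnf_str[i + 1] == "'":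
--                 res[-1].append(-lit)
--             else:
--                 res[-1].append(lit)
--     return res
-- ===== Notes on version B (the rewrite author's own statement) =====
-- stated objective: simpler
-- what changed: B replaces A's split-on-'v' followed by a nested index loop with per-conjunction bounds-checked lookahead by a single enumerate pass over the raw string that opens a new conjunction on 'v' and appends signed codes to the last one, using a whole-string lookahead.
import Mathlib
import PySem

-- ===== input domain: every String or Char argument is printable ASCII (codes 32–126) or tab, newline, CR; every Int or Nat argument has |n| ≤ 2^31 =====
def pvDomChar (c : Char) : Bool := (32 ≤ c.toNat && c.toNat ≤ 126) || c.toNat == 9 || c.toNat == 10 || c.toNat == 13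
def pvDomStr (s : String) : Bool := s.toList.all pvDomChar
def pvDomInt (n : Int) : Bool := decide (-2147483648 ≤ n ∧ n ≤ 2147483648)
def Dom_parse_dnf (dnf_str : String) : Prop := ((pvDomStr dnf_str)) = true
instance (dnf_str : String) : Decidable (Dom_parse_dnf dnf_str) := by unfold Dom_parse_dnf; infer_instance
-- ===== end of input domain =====

-- B makes one pass over the raw string (new conjunction on 'v', signed codes appended to the last one)
-- instead of A's split-on-'v' plus nested index loops; same return value, objective: simpler decomposition.

-- ===== PORT A =====
def parse_dnf (dnf_str : String) : List (List Int) :=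
  -- dnf_str = "".join(dnf_str): joining the characters of a string with "" (a no-op)
  let cs : List Char := PySem.Chars.join [] (dnf_str.toList.map (fun c => [c]))
  let conj_list : List (List Char) := PySem.Chars.splitOn cs ['v']
  let conj_num : Nat := conj_list.length
  let dnf0 : List (List Int) := (PySem.List.pyRange 0 (conj_num : Int) 1).map (fun _ => ([] : List Int))
  (PySem.List.pyRange 0 (conj_num : Int) 1).foldl (fun dnf conj_idx =>
    let conj : List Char := PySem.List.pyGetD conj_list conj_idx []   -- index always in range
    let conj_len : Nat := conj.length
    (PySem.List.pyRange 0 (conj_len : Int) 1).foldl (fun dnf i =>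
      let c : Char := PySem.List.pyGetD conj i ' '                    -- index always in range
      if PySem.Chars.isalnum c then
        -- i < conj_len-1 and conj[i+1] == "'"  (the guard keeps the index in range)
        if decide (i < (conj_len : Int) - 1) && (PySem.List.pyGetD conj (i + 1) ' ' == '\'') then
          dnf.modify conj_idx.toNat (fun row => row ++ [-(c.toNat : Int)])
        else
          dnf.modify conj_idx.toNat (fun row => row ++ [(c.toNat : Int)])
      else dnf) dnf) dnf0

-- ===== PORT B =====
-- res[-1].append(x) on a non-empty list of lists
def pvAppendLast (l : List (List Int)) (x : Int) : List (List Int) :=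
  match l with
  | [] => []
  | [r] => [r ++ [x]]
  | r :: rest => r :: pvAppendLast rest x

def parse_dnf_alt (dnf_str : String) : List (List Int) :=
  let cs : List Char := dnf_str.toList
  let n : Nat := cs.length
  (PySem.List.enumerate cs).foldl (fun res p =>
    let i : Int := p.1
    let c : Char := p.2
    if c == 'v' then res ++ [[]]
    else if PySem.Chars.isalnum c then
      let lit : Int := c.toNat
      if decide (i + 1 < (n : Int)) && (PySem.List.pyGetD cs (i + 1) ' ' == '\'') then
        pvAppendLast res (-lit)
      else
        pvAppendLast res lit
    else res) [[]]

-- ===== PRECONDITION & SPEC =====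
def Spec_parse_dnf (dnf_str : String) (out : List (List Int)) : Prop := out = parse_dnf_alt dnf_str
instance (dnf_str : String) (out : List (List Int)) : Decidable (Spec_parse_dnf dnf_str out) := by unfold Spec_parse_dnf; infer_instance

-- ===== CLAIM (what is proved, stated in full; the proofs are below) =====
def Claim_equal_parse_dnf : Prop := ∀ (dnf_str : String), Dom_parse_dnf dnf_str → Spec_parse_dnf dnf_str (parse_dnf dnf_str)

-- ===== LEMMAS AND PROOFS =====

-- structural version of str.split('v')
def pvSplit : List Char → List (List Char)
  | [] => [[]]
  | c :: r => if c = 'v' then [] :: pvSplit r else List.modifyHead (c :: ·) (pvSplit r)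

-- structural version of A's inner loop over one conjunction (lookahead = head of the rest)
def pvProc : List Char → List Int
  | [] => []
  | c :: r =>
    if PySem.Chars.isalnum c then
      (if r.head? = some '\'' then -(c.toNat : Int) else (c.toNat : Int)) :: pvProc r
    else pvProc r

theorem pvSplit_ne_nil (l : List Char) : pvSplit l ≠ [] := by
  induction l with
  | nil => simp [pvSplit]
  | cons c r ih =>
    simp only [pvSplit]
    split
    · simp
    · cases h : pvSplit r with
      | nil => exact absurd h ih
      | cons a t => simp [List.modifyHead]

theorem pvSplit_go (fuel : Nat) (l cur : List Char) (acc : List (List Char))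
    (h : l.length < fuel) :
    PySem.Chars.splitOn.go ['v'] fuel l cur acc
      = acc.reverse ++ List.modifyHead (cur.reverse ++ ·) (pvSplit l) := by
  induction fuel generalizing l cur acc with
  | zero => omega
  | succ f ih =>
    cases l with
    | nil => simp [PySem.Chars.splitOn.go, pvSplit]
    | cons c r =>
      by_cases hc : c = 'v'
      · subst hc
        have hpre : List.isPrefixOf ['v'] ('v' :: r) = true := by simp [List.isPrefixOf]
        rw [PySem.Chars.splitOn.go]
        simp only [hpre, if_pos, List.length_cons, List.length_nil, List.drop_succ_cons, List.drop_zero]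
        rw [ih r [] (cur.reverse :: acc) (by simpa using Nat.lt_of_succ_lt_succ h)]
        cases hs : pvSplit r with
        | nil => exact absurd hs (pvSplit_ne_nil r)
        | cons a t => simp [pvSplit, hs, List.modifyHead]
      · have hpre : List.isPrefixOf ['v'] (c :: r) = false := by
          simp [List.isPrefixOf]; exact fun hh => absurd hh.symm hc
        rw [PySem.Chars.splitOn.go]
        simp only [hpre, Bool.false_eq_true, if_false]
        rw [ih r (c :: cur) acc (by simpa using Nat.lt_of_succ_lt_succ h)]
        cases hs : pvSplit r with
        | nil => exact absurd hs (pvSplit_ne_nil r)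
        | cons a t => simp [pvSplit, hs, hc, List.modifyHead]

theorem pvSplit_eq (cs : List Char) :
    PySem.Chars.splitOn cs ['v'] = pvSplit cs := by
  rw [PySem.Chars.splitOn, pvSplit_go (cs.length + 1) cs [] [] (by omega)]
  cases hs : pvSplit cs with
  | nil => exact absurd hs (pvSplit_ne_nil cs)
  | cons a t => simp [List.modifyHead]

theorem pvModify_append (pre : List (List Int)) (x : List Int) (t : List (List Int))
    (f : List Int → List Int) :
    (pre ++ x :: t).modify pre.length f = pre ++ f x :: t := by
  have h := List.modifyTailIdx_add (List.modifyHead f) 0 pre (x :: t)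
  simpa [List.modify, List.modifyHead] using h

theorem pvGetD_append (pre : List Char) (c : Char) (r : List Char) (d : Char) :
    (pre ++ c :: r).getD pre.length d = c := by
  induction pre with
  | nil => simp
  | cons a p ih => simp

-- A's inner index loop, with the processed prefix generalized
theorem pvModify_modify (l : List (List Int)) (j : Nat) (f g : List Int → List Int) :
    (l.modify j f).modify j g = l.modify j (fun x => g (f x)) := by
  by_cases hj : j < l.length
  · apply List.ext_getElem
    · simp
    · intro k h1 h2
      simp only [List.getElem_modify]
      split <;> simp_all
  · rw [List.modify_eq_self (by simpa using hj), List.modify_eq_self (by simpa using hj),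
        List.modify_eq_self (by simpa using hj)]

theorem pvModify_append_nil (l : List (List Int)) (j : Nat) :
    l.modify j (fun row => row ++ []) = l := by
  have : (fun row : List Int => row ++ []) = id := by funext r; simp
  rw [this, List.modify_id]

theorem pvAInner (conj : List Char) (suf pre : List Char) (hconj : conj = pre ++ suf)
    (dnf : List (List Int)) (j : Nat) :
    ((PySem.List.pyRange (pre.length : Int) (conj.length : Int) 1).foldl
      (fun dnf i =>
        if PySem.Chars.isalnum (PySem.List.pyGetD conj i ' ') then
          if decide (i < (conj.length : Int) - 1) && (PySem.List.pyGetD conj (i + 1) ' ' == '\'') then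
            dnf.modify j (fun row => row ++ [-((PySem.List.pyGetD conj i ' ').toNat : Int)])
          else
            dnf.modify j (fun row => row ++ [((PySem.List.pyGetD conj i ' ').toNat : Int)])
        else dnf) dnf)
      = dnf.modify j (fun row => row ++ pvProc suf) := by
  induction suf generalizing pre dnf with
  | nil =>
    rw [PySem.List.pyRange_one_eq_nil (by simp [hconj])]
    simp only [List.foldl_nil, pvProc]
    rw [pvModify_append_nil]
  | cons c r ih =>
    have hlen : conj.length = pre.length + (r.length + 1) := by simp [hconj]
    have hlt : (pre.length : Int) < (conj.length : Int) := by
      rw [hlen]; push_cast; omega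
    rw [PySem.List.pyRange_one_cons hlt, List.foldl_cons]
    have hget : PySem.List.pyGetD conj ((pre.length : Nat) : Int) ' ' = c := by
      rw [PySem.List.pyGetD_natCast, hconj, pvGetD_append]
    have hpre1 : ((pre ++ [c]).length : Int) = (pre.length : Int) + 1 := by
      simp only [List.length_append, List.length_cons, List.length_nil]; push_cast; ring
    have hconj' : conj = (pre ++ [c]) ++ r := by simp [hconj]
    -- the lookahead condition equals  r.head? = some '\''
    have hcond : (decide (((pre.length : Nat) : Int) < (conj.length : Int) - 1)
        && (PySem.List.pyGetD conj (((pre.length : Nat) : Int) + 1) ' ' == '\''))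
        = decide (r.head? = some '\'') := by
      cases r with
      | nil =>
        have : ¬ (((pre.length : Nat) : Int) < (conj.length : Int) - 1) := by
          rw [hlen]; simp only [List.length_nil, List.length_cons, List.length_append]
          push_cast; omega
        simp [this]
      | cons d r' =>
        have h1 : (((pre.length : Nat) : Int) < (conj.length : Int) - 1) := by
          rw [hlen]; simp only [List.length_nil, List.length_cons, List.length_append]
          push_cast; omega
        have h2 : PySem.List.pyGetD conj (((pre.length : Nat) : Int) + 1) ' ' = d := by
          have : (((pre.length : Nat) : Int) + 1) = (((pre ++ [c]).length : Nat) : Int) := by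
            rw [hpre1]
          rw [this, PySem.List.pyGetD_natCast, hconj']
          have : (pre ++ [c]) ++ d :: r' = (pre ++ [c]) ++ d :: r' := rfl
          exact pvGetD_append (pre ++ [c]) d r' ' '
        simp only [h1, decide_true, Bool.true_and, h2]
        by_cases hh : d = '\''
        · simp [hh]
        · simp [hh]
    simp only [hget, hcond]
    by_cases ha : PySem.Chars.isalnum c = true
    · simp only [ha, if_true]
      by_cases hq : r.head? = some '\''
      · simp only [hq, decide_true]
        rw [if_pos trivial]
        rw [show ((pre.length : Nat) : Int) + 1 = ((pre ++ [c]).length : Int) from hpre1.symm]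
        rw [ih (pre ++ [c]) hconj' _]
        rw [pvModify_modify]
        have : pvProc (c :: r) = -(c.toNat : Int) :: pvProc r := by
          simp [pvProc, ha, hq]
        rw [this]
        congr 1
        funext row
        simp
      · simp only [hq, decide_false]
        rw [if_neg (by simp)]
        rw [show ((pre.length : Nat) : Int) + 1 = ((pre ++ [c]).length : Int) from hpre1.symm]
        rw [ih (pre ++ [c]) hconj' _]
        rw [pvModify_modify]
        have : pvProc (c :: r) = (c.toNat : Int) :: pvProc r := by
          simp [pvProc, ha, hq]
        rw [this]
        congr 1
        funext row
        simp
    · simp only [Bool.not_eq_true] at ha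
      rw [if_neg (by simp [ha])]
      rw [show ((pre.length : Nat) : Int) + 1 = ((pre ++ [c]).length : Int) from hpre1.symm]
      rw [ih (pre ++ [c]) hconj' _]
      have : pvProc (c :: r) = pvProc r := by simp [pvProc, ha]
      rw [this]

-- A's outer loop
theorem pvAOuter (L : List (List Char)) (conjs : List (List Char)) (pre : List (List Int))
    (h : conjs.drop pre.length = L) :
    ((PySem.List.pyRange (pre.length : Int) ((pre.length + L.length : Nat) : Int) 1).foldl
      (fun dnf conj_idx =>
        (PySem.List.pyRange 0 ((PySem.List.pyGetD conjs conj_idx []).length : Int) 1).foldl (fun dnf i =>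
          if PySem.Chars.isalnum (PySem.List.pyGetD (PySem.List.pyGetD conjs conj_idx []) i ' ') then
            if decide (i < ((PySem.List.pyGetD conjs conj_idx []).length : Int) - 1)
                && (PySem.List.pyGetD (PySem.List.pyGetD conjs conj_idx []) (i + 1) ' ' == '\'') then
              dnf.modify conj_idx.toNat (fun row => row ++ [-((PySem.List.pyGetD (PySem.List.pyGetD conjs conj_idx []) i ' ').toNat : Int)])
            else
              dnf.modify conj_idx.toNat (fun row => row ++ [((PySem.List.pyGetD (PySem.List.pyGetD conjs conj_idx []) i ' ').toNat : Int)])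
          else dnf) dnf)
      (pre ++ List.replicate L.length []))
      = pre ++ L.map pvProc := by
  induction L generalizing pre with
  | nil =>
    rw [PySem.List.pyRange_one_eq_nil (by simp)]
    simp
  | cons cL r ih =>
    have hlt : (pre.length : Int) < ((pre.length + (cL :: r).length : Nat) : Int) := by
      simp only [List.length_cons]; push_cast; omega
    rw [PySem.List.pyRange_one_cons hlt, List.foldl_cons]
    have hget : PySem.List.pyGetD conjs ((pre.length : Nat) : Int) [] = cL := by
      rw [PySem.List.pyGetD_natCast, List.getD_eq_getElem?_getD]
      have : conjs[pre.length]? = some cL := by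
        have h0 : (conjs.drop pre.length)[0]? = some cL := by rw [h]; rfl
        rwa [List.getElem?_drop, Nat.add_zero] at h0
      rw [this]; rfl
    simp only [hget]
    have hin := fun (dnf : List (List Int)) (j : Nat) => pvAInner cL cL [] (by simp) dnf j
    simp only [List.length_nil, Nat.cast_zero] at hin
    rw [hin]
    rw [show List.replicate (cL :: r).length ([] : List Int) = [] :: List.replicate r.length [] from rfl]
    have hmod : (pre ++ [] :: List.replicate r.length []).modify ((pre.length : Int)).toNat
        (fun row => row ++ pvProc cL) = (pre ++ [pvProc cL]) ++ List.replicate r.length [] := by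
      rw [Int.toNat_natCast, pvModify_append]
      simp
    rw [hmod]
    have h' : conjs.drop (pre ++ [pvProc cL]).length = r := by
      simp only [List.length_append, List.length_cons, List.length_nil]
      rw [show pre.length + (0 + 1) = pre.length + 1 by ring]
      rw [← List.drop_drop, h]
      rfl
    have hlen2 : ((pre.length + (cL :: r).length : Nat) : Int)
        = (((pre ++ [pvProc cL]).length + r.length : Nat) : Int) := by
      push_cast; simp; ring
    have hstart : (pre.length : Int) + 1 = ((pre ++ [pvProc cL]).length : Int) := by
      push_cast; simp
    rw [hlen2, hstart, ih (pre ++ [pvProc cL]) h']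
    simp

theorem pvA_eq (dnf_str : String) :
    parse_dnf dnf_str = (pvSplit dnf_str.toList).map pvProc := by
  unfold parse_dnf
  simp only [PySem.Chars.join_nil_singletons]
  rw [pvSplit_eq]
  have hrep : (PySem.List.pyRange 0 ((pvSplit dnf_str.toList).length : Int) 1).map
      (fun _ => ([] : List Int)) = List.replicate (pvSplit dnf_str.toList).length [] := by
    rw [List.map_const', PySem.List.length_pyRange_one]
    simp
  rw [hrep]
  have := pvAOuter (pvSplit dnf_str.toList) (pvSplit dnf_str.toList) [] (by simp)
  simpa using this

-- relation between B's whole-string lookahead and pvProc's piece-local lookahead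
theorem pvHead_pvSplit (r : List Char) (hd : List Char) (t : List (List Char))
    (hs : pvSplit r = hd :: t) :
    (hd.head? = some '\'') ↔ (r.head? = some '\'') := by
  cases r with
  | nil => simp [pvSplit] at hs; simp [hs.1]
  | cons d r' =>
    by_cases hdv : d = 'v'
    · subst hdv
      simp [pvSplit] at hs
      simp [hs.1]
    · simp only [pvSplit, hdv, if_false] at hs
      rcases hches : pvSplit r' with _ | ⟨h', t'⟩
      · exact absurd hches (pvSplit_ne_nil r')
      · rw [hches] at hs
        simp [List.modifyHead] at hs
        simp [← hs.1]

theorem pvAppendLast_eq (init : List (List Int)) (last : List Int) (x : Int) :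
    pvAppendLast (init ++ [last]) x = init ++ [last ++ [x]] := by
  induction init with
  | nil => simp [pvAppendLast]
  | cons a t ih =>
    cases t with
    | nil => simp [pvAppendLast]
    | cons b t' => simpa [pvAppendLast] using ih

theorem pvBFold (cs : List Char) (suf pre : List Char) (hcs : cs = pre ++ suf)
    (init : List (List Int)) (last : List Int) :
    ((PySem.List.enumerate suf (pre.length : Int)).foldl
      (fun res p =>
        if p.2 == 'v' then res ++ [[]]
        else if PySem.Chars.isalnum p.2 then
          if decide (p.1 + 1 < (cs.length : Int)) && (PySem.List.pyGetD cs (p.1 + 1) ' ' == '\'') then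
            pvAppendLast res (-(p.2.toNat : Int))
          else
            pvAppendLast res ((p.2.toNat : Int))
        else res)
      (init ++ [last]))
      = init ++ List.modifyHead (last ++ ·) ((pvSplit suf).map pvProc) := by
  induction suf generalizing pre init last with
  | nil => simp [pvSplit, pvProc, List.modifyHead]
  | cons c r ih =>
    rw [PySem.List.enumerate_cons, List.foldl_cons]
    rcases hsp : pvSplit r with _ | ⟨hd, t⟩
    · exact absurd hsp (pvSplit_ne_nil r)
    have hcs' : cs = (pre ++ [c]) ++ r := by simp [hcs]
    have hstart : ((pre.length : Nat) : Int) + 1 = (((pre ++ [c]).length : Nat) : Int) := by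
      simp only [List.length_append, List.length_cons, List.length_nil]; push_cast; ring
    have hcond : (decide (((pre.length : Nat) : Int) + 1 < (cs.length : Int))
        && (PySem.List.pyGetD cs (((pre.length : Nat) : Int) + 1) ' ' == '\''))
        = decide (r.head? = some '\'') := by
      cases r with
      | nil =>
        have : ¬ (((pre.length : Nat) : Int) + 1 < (cs.length : Int)) := by
          rw [hcs]; simp only [List.length_append, List.length_cons, List.length_nil]
          push_cast; omega
        simp [this]
      | cons d r' =>
        have h1 : (((pre.length : Nat) : Int) + 1 < (cs.length : Int)) := by
          rw [hcs]; simp only [List.length_append, List.length_cons, List.length_nil]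
          push_cast; omega
        have h2 : PySem.List.pyGetD cs (((pre.length : Nat) : Int) + 1) ' ' = d := by
          rw [hstart, PySem.List.pyGetD_natCast, hcs']
          exact pvGetD_append (pre ++ [c]) d r' ' '
        simp only [h1, decide_true, Bool.true_and, h2]
        by_cases hh : d = '\''
        · simp [hh]
        · simp [hh]
    by_cases hv : c = 'v'
    · subst hv
      rw [if_pos (by simp)]
      rw [hstart, ih (pre ++ ['v']) (by simpa using hcs) (init ++ [last]) []]
      simp only [pvSplit, hsp, List.map_cons, List.modifyHead]
      simp [pvProc]
    · have hne : (c == 'v') = false := by simp [hv]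
      simp only [hne, Bool.false_eq_true, if_false]
      by_cases ha : PySem.Chars.isalnum c = true
      · simp only [ha, if_true, hcond]
        have hsplit : pvSplit (c :: r) = (c :: hd) :: t := by
          simp [pvSplit, hv, hsp, List.modifyHead]
        by_cases hq : r.head? = some '\''
        · simp only [hq, decide_true]
          rw [if_pos trivial]
          rw [pvAppendLast_eq, hstart, ih (pre ++ [c]) hcs' init (last ++ [-(c.toNat : Int)])]
          rw [hsplit]
          have hpc : pvProc (c :: hd) = -(c.toNat : Int) :: pvProc hd := by
            simp [pvProc, ha, (pvHead_pvSplit r hd t hsp).2 hq]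
          simp [hpc, hsp, List.modifyHead]
        · simp only [hq, decide_false]
          rw [if_neg (by simp)]
          rw [pvAppendLast_eq, hstart, ih (pre ++ [c]) hcs' init (last ++ [(c.toNat : Int)])]
          rw [hsplit]
          have hqq : ¬ hd.head? = some '\'' := fun hh => hq ((pvHead_pvSplit r hd t hsp).1 hh)
          have hpc : pvProc (c :: hd) = (c.toNat : Int) :: pvProc hd := by
            simp [pvProc, ha, hqq]
          simp [hpc, hsp, List.modifyHead]
      · simp only [Bool.not_eq_true] at ha
        simp only [ha, Bool.false_eq_true, if_false]
        rw [hstart, ih (pre ++ [c]) hcs' init last]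
        have hsplit : pvSplit (c :: r) = (c :: hd) :: t := by
          simp [pvSplit, hv, hsp, List.modifyHead]
        rw [hsplit]
        have hpc : pvProc (c :: hd) = pvProc hd := by simp [pvProc, ha]
        simp [hpc, List.modifyHead, hsp]

theorem pvB_eq (dnf_str : String) :
    parse_dnf_alt dnf_str = (pvSplit dnf_str.toList).map pvProc := by
  have h := pvBFold dnf_str.toList dnf_str.toList [] rfl [] []
  simp only [List.length_nil, Nat.cast_zero, List.nil_append] at h
  unfold parse_dnf_alt
  rw [h]
  rcases hsp : pvSplit dnf_str.toList with _ | ⟨hd, t⟩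
  · exact absurd hsp (pvSplit_ne_nil _)
  · simp [List.modifyHead]

-- ===== VERDICT (by name: the statement is the Claim_ definition above) =====
theorem parse_dnf_spec : Claim_equal_parse_dnf := by
  intro s _
  unfold Spec_parse_dnf
  rw [pvA_eq, pvB_eq]
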